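-- pv_equiv track=rewrite | github.com/RGZ1890/codetree-TILs | 241229/k개의 벽 없애기/remove-k-walls.py | solution
-- ===== SOURCE A (Python) =====
-- from collections import deque
--
-- dirs = [[-1, 0], [0, 1], [1, 0], [0, -1]]
--
-- def bfs(board, n, start, end):
--     dist = [[n * n] * (n + 2) for _ in range(n + 2)]
--     dist[start[0]][start[1]] = 0
--     q = deque()
--     q.append(start)
--     while q:
--         cur = q.popleft()
--         for d in dirs:
--             nex = [cur[0] + d[0], cur[1] + d[1]]
--             if board[nex[0]][nex[1]] == 0 \
--             and dist[nex[0]][nex[1]] == n * n: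
--                 dist[nex[0]][nex[1]] = dist[cur[0]][cur[1]] + 1
--                 if nex == end:
--                     return dist[nex[0]][nex[1]]
--                 q.append(nex)
--
--     return n * n
--
-- def pick(w, k, cur, picked, comb):
--     if len(picked) == k:
--         return comb + [picked]
--     if cur == w:
--         return comb
--
--     comb = pick(w, k, cur + 1, picked + [cur], comb)
--     comb = pick(w, k, cur + 1, picked, comb)
--
--     return comb
--
-- def solution(board, n, walls, k, start, end):
--     if start == end:
--         return 0
--     comb = pick(len(walls), k, 0, [], [])
--     ans = n * n
--     for c in comb:
--         for w in c:
--             board[walls[w][0]][walls[w][1]] = 0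
--         ans = min(ans, bfs(board, n, start, end))
--         for w in c:
--             board[walls[w][0]][walls[w][1]] = 1
--
--     return ans if ans != n * n else -1
-- ===== SOURCE B (Python) =====
-- # B: per-combination level BFS with a visited set and a removed-cell set (no dist
-- # matrix, no deque, no board mutation); combinations generated by structural
-- # recursion on the index list instead of an accumulator recursion.
-- DIRS = [(-1, 0), (0, 1), (1, 0), (0, -1)]
--
-- def combos(items, k):
--     if k == 0:
--         return [[]]
--     if not items:
--         return []
--     rest = items[1:]
--     return [[items[0]] + t for t in combos(rest, k - 1)] + combos(rest, k)
--
-- def bfs2(board, n, removed, start, end):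
--     target = (end[0], end[1])
--     visited = {(start[0], start[1])}
--     frontier = [(start[0], start[1])]
--     steps = 0
--     while frontier:
--         steps += 1
--         nxt = []
--         for (r, c) in frontier:
--             for (dr, dc) in DIRS:
--                 p = (r + dr, c + dc)
--                 if (board[r + dr][c + dc] == 0 or p in removed) and p not in visited:
--                     if p == target:
--                         return steps
--                     visited.add(p)
--                     nxt.append(p)
--         frontier = nxt
--     return n * n
--
-- def solution(board, n, walls, k, start, end):
--     if start == end:
--         return 0
--     best = n * n
--     for idxs in combos(list(range(len(walls))), k):
--         removed = {(walls[i][0], walls[i][1]) for i in idxs}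
--         best = min(best, bfs2(board, n, removed, start, end))
--     return -1 if best == n * n else best
-- ===== Notes on version B (the rewrite author's own statement) =====
-- stated objective: alternative
-- what changed: B replaces A's dist-matrix + deque BFS with in-place board mutation per wall combination by a frontier/level BFS over coordinate tuples with a visited set and a removed-cell set (the board is never modified), and generates the k-combinations by structural recursion on the index list instead of A's accumulator-passing recursion. …
import Mathlib
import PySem

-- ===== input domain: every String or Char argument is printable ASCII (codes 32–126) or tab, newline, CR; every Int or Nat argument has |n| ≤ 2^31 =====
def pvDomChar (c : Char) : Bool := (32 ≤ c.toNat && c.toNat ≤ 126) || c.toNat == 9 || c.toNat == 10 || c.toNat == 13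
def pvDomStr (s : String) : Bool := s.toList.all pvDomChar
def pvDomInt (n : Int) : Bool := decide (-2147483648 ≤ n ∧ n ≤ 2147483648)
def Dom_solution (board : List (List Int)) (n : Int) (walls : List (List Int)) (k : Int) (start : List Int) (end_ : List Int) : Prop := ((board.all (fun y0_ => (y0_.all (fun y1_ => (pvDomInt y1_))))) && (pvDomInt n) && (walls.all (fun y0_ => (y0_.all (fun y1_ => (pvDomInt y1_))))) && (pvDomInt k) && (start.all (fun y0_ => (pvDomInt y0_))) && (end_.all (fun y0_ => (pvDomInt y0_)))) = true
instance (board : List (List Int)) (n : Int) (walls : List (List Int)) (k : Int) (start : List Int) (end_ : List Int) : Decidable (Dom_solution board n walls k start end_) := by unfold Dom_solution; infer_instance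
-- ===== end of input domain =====

-- B replaces A's dist-matrix + deque BFS with in-place board mutation per wall combination by a
-- frontier/level BFS over coordinate tuples with a visited set and a removed-cell set (the board is
-- never modified), and generates the k-combinations structurally instead of by accumulator recursion.
-- Equivalence is about the RETURN value only: Python A temporarily mutates `board` in place (and does
-- not restore it exactly when a walls entry points at a non-wall cell — excluded by Pre_); B never does.

-- ===== PORT A =====
-- shared 2-d indexing helpers (Python board[r][c] reads / dist[r][c] = v writes; in range under Pre_)
def get2 (b : List (List Int)) (r c : Int) : Int :=
  PySem.List.pyGetD (PySem.List.pyGetD b r []) c 0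

def set2 (b : List (List Int)) (r c v : Int) : List (List Int) :=
  PySem.List.pySetD b r (PySem.List.pySetD (PySem.List.pyGetD b r []) c v)

def dirsA : List (List Int) := [[-1, 0], [0, 1], [1, 0], [0, -1]]

-- the `for d in dirs` body of A's bfs loop: early return (.inl) or updated (queue, dist)
def stepDirsA (board : List (List Int)) (nn : Int) (end_ : List Int) (cur : List Int) :
    List (List Int) → List (List Int) → List (List Int) →
    Sum Int (List (List Int) × List (List Int))
  | [], q, dist => .inr (q, dist)
  | d :: ds, q, dist =>
    let nex : List Int := [PySem.List.pyGetD cur 0 0 + PySem.List.pyGetD d 0 0,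
                           PySem.List.pyGetD cur 1 0 + PySem.List.pyGetD d 1 0]
    let nr := PySem.List.pyGetD nex 0 0
    let nc := PySem.List.pyGetD nex 1 0
    if get2 board nr nc = 0 ∧ get2 dist nr nc = nn then
      let dist' := set2 dist nr nc
        (get2 dist (PySem.List.pyGetD cur 0 0) (PySem.List.pyGetD cur 1 0) + 1)
      if nex = end_ then .inl (get2 dist' nr nc)
      else stepDirsA board nn end_ cur ds (q ++ [nex]) dist'
    else stepDirsA board nn end_ cur ds q dist

-- A's `while q:` loop (fuel only makes the recursion structural; never exhausted under Pre_)
def loopA (board : List (List Int)) (nn : Int) (end_ : List Int) :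
    Nat → List (List Int) → List (List Int) → Int
  | 0, _, _ => nn
  | _ + 1, [], _ => nn
  | f + 1, cur :: q, dist =>
    match stepDirsA board nn end_ cur dirsA q dist with
    | .inl ans => ans
    | .inr (q', dist') => loopA board nn end_ f q' dist'

def bfsA (board : List (List Int)) (n : Int) (start end_ : List Int) : Int :=
  let dist0 := List.replicate (n + 2).toNat (List.replicate (n + 2).toNat (n * n))
  let dist1 := set2 dist0 (PySem.List.pyGetD start 0 0) (PySem.List.pyGetD start 1 0) 0
  loopA board (n * n) end_ ((n + 2).toNat * (n + 2).toNat + 2) [start] dist1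

-- A's pick (fuel only makes the recursion structural; pick recurses on cur → cur+1 up to w)
def pickA (w k : Int) : Nat → Int → List Int → List (List Int) → List (List Int)
  | 0, _, _, comb => comb
  | f + 1, cur, picked, comb =>
    if (picked.length : Int) = k then comb ++ [picked]
    else if cur = w then comb
    else pickA w k f (cur + 1) picked (pickA w k f (cur + 1) (picked ++ [cur]) comb)

def wallR (walls : List (List Int)) (w : Int) : Int :=
  PySem.List.pyGetD (PySem.List.pyGetD walls w []) 0 0
def wallC (walls : List (List Int)) (w : Int) : Int :=
  PySem.List.pyGetD (PySem.List.pyGetD walls w []) 1 0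

def solution (board : List (List Int)) (n : Int) (walls : List (List Int)) (k : Int) (start : List Int) (end_ : List Int) : Int :=
  if start = end_ then 0
  else
    let comb := pickA (walls.length : Int) k (walls.length + 1) 0 [] []
    let res := comb.foldl (fun (st : List (List Int) × Int) c =>
      let bd := c.foldl (fun bd w => set2 bd (wallR walls w) (wallC walls w) 0) st.1
      let a := min st.2 (bfsA bd n start end_)
      let bd2 := c.foldl (fun bd w => set2 bd (wallR walls w) (wallC walls w) 1) bd
      (bd2, a)) (board, n * n)
    if res.2 ≠ n * n then res.2 else -1

-- ===== PORT B =====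
def dirsB : List (Int × Int) := [(-1, 0), (0, 1), (1, 0), (0, -1)]

def combosB (items : List Int) (k : Int) : List (List Int) :=
  if k = 0 then [[]]
  else
    match items with
    | [] => []
    | x :: rest => (combosB rest (k - 1)).map (fun t => x :: t) ++ combosB rest k

-- the `for (dr, dc) in DIRS` body of B's bfs2
def dirLoopB (board : List (List Int)) (removed : PySem.Set (Int × Int)) (target : Int × Int)
    (steps : Int) (r c : Int) :
    List (Int × Int) → List (Int × Int) → PySem.Set (Int × Int) →
    Sum Int (List (Int × Int) × PySem.Set (Int × Int))
  | [], nxt, vis => .inr (nxt, vis)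
  | (dr, dc) :: ds, nxt, vis =>
    let p : Int × Int := (r + dr, c + dc)
    if (get2 board (r + dr) (c + dc) = 0 ∨ p ∈ removed) ∧ p ∉ vis then
      if p = target then .inl steps
      else dirLoopB board removed target steps r c ds (nxt ++ [p]) (PySem.Set.add vis p)
    else dirLoopB board removed target steps r c ds nxt vis

-- the `for (r, c) in frontier` body of B's bfs2
def cellLoopB (board : List (List Int)) (removed : PySem.Set (Int × Int)) (target : Int × Int)
    (steps : Int) :
    List (Int × Int) → List (Int × Int) → PySem.Set (Int × Int) →
    Sum Int (List (Int × Int) × PySem.Set (Int × Int))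
  | [], nxt, vis => .inr (nxt, vis)
  | (r, c) :: rest, nxt, vis =>
    match dirLoopB board removed target steps r c dirsB nxt vis with
    | .inl a => .inl a
    | .inr (nxt', vis') => cellLoopB board removed target steps rest nxt' vis'

-- B's `while frontier:` level loop (fuel only makes the recursion structural)
def levelLoopB (board : List (List Int)) (n : Int) (removed : PySem.Set (Int × Int))
    (target : Int × Int) :
    Nat → List (Int × Int) → PySem.Set (Int × Int) → Int → Int
  | 0, _, _, _ => n * n
  | f + 1, frontier, vis, steps =>
    if frontier = [] then n * n
    else
      match cellLoopB board removed target (steps + 1) frontier [] vis with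
      | .inl a => a
      | .inr (nxt, vis') => levelLoopB board n removed target f nxt vis' (steps + 1)

def bfsB (board : List (List Int)) (n : Int) (removed : PySem.Set (Int × Int))
    (start end_ : List Int) : Int :=
  let target := (PySem.List.pyGetD end_ 0 0, PySem.List.pyGetD end_ 1 0)
  let s := (PySem.List.pyGetD start 0 0, PySem.List.pyGetD start 1 0)
  levelLoopB board n removed target ((n * n).toNat + 2) [s] (PySem.Set.ofList [s]) 0

def solution_alt (board : List (List Int)) (n : Int) (walls : List (List Int)) (k : Int) (start : List Int) (end_ : List Int) : Int :=
  if start = end_ then 0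
  else
    let best := (combosB (PySem.List.pyRange 0 walls.length 1) k).foldl
      (fun best idxs =>
        let removed := PySem.Set.ofList (idxs.map (fun i => (wallR walls i, wallC walls i)))
        min best (bfsB board n removed start end_)) (n * n)
    if best = n * n then -1 else best

-- ===== PRECONDITION & SPEC =====
-- Pre_ admits every trivially-returning input (start = end_, or k outside 0..len(walls), where both
-- programs answer without touching the board) and otherwise the well-formed instances; it excludes
-- inputs on which A raises (board not a bordered (n+2)×(n+2) grid, coordinates outside it) and three
-- kinds of inputs on which A still returns a value that is an accident of its implementation: walls
-- entries pointing at non-wall cells (A's 0→1 "restore" then corrupts the board and the result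
-- depends on combination order), start/end lists not of length 2 (A's `nex == end` match then never
-- fires), and out-of-interior coordinates (A's result goes through Python negative-index wraparound
-- aliasing in its dist matrix).
def Pre_solution (board : List (List Int)) (n : Int) (walls : List (List Int)) (k : Int) (start : List Int) (end_ : List Int) : Prop :=
  start = end_ ∨ k < 0 ∨ (walls.length : Int) < k ∨
  (1 ≤ n ∧
  board.length = (n + 2).toNat ∧
  (∀ row ∈ board, row.length = (n + 2).toNat) ∧
  (∀ x ∈ board.getD 0 [], x ≠ 0) ∧
  (∀ x ∈ board.getD (n + 1).toNat [], x ≠ 0) ∧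
  (∀ row ∈ board, row.getD 0 0 ≠ 0 ∧ row.getD (n + 1).toNat 0 ≠ 0) ∧
  (∀ w ∈ walls, 2 ≤ w.length ∧
    1 ≤ w.getD 0 0 ∧ w.getD 0 0 ≤ n ∧ 1 ≤ w.getD 1 0 ∧ w.getD 1 0 ≤ n ∧
    (board.getD (w.getD 0 0).toNat []).getD (w.getD 1 0).toNat 0 = 1) ∧
  start.length = 2 ∧ 1 ≤ start.getD 0 0 ∧ start.getD 0 0 ≤ n ∧
    1 ≤ start.getD 1 0 ∧ start.getD 1 0 ≤ n ∧
  end_.length = 2 ∧ 1 ≤ end_.getD 0 0 ∧ end_.getD 0 0 ≤ n ∧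
    1 ≤ end_.getD 1 0 ∧ end_.getD 1 0 ≤ n)

instance (board : List (List Int)) (n : Int) (walls : List (List Int)) (k : Int) (start : List Int) (end_ : List Int) : Decidable (Pre_solution board n walls k start end_) := by
  unfold Pre_solution; infer_instance

def pvWitness_solution : List (List Int) × Int × List (List Int) × Int × List Int × List Int :=
  ([[1, 1, 1], [1, 0, 1], [1, 1, 1]], 1, [], 0, [1, 1], [1, 1])

def Spec_solution (board : List (List Int)) (n : Int) (walls : List (List Int)) (k : Int) (start : List Int) (end_ : List Int) (out : Int) : Prop := out = solution_alt board n walls k start end_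
instance (board : List (List Int)) (n : Int) (walls : List (List Int)) (k : Int) (start : List Int) (end_ : List Int) (out : Int) : Decidable (Spec_solution board n walls k start end_ out) := by unfold Spec_solution; infer_instance

-- ===== CLAIM (what is proved, stated in full; the proofs are below) =====
def Claim_equal_solution : Prop := ∀ (board : List (List Int)) (n : Int) (walls : List (List Int)) (k : Int) (start : List Int) (end_ : List Int), Dom_solution board n walls k start end_ → Pre_solution board n walls k start end_ → Spec_solution board n walls k start end_ (solution board n walls k start end_)

-- ===== LEMMAS AND PROOFS =====

-- proof-side helpers
def toL (p : Int × Int) : List Int := [p.1, p.2]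

def interP (n : Int) (p : Int × Int) : Prop := 1 ≤ p.1 ∧ p.1 ≤ n ∧ 1 ≤ p.2 ∧ p.2 ≤ n

def Shape (n : Int) (d : List (List Int)) : Prop :=
  d.length = (n + 2).toNat ∧ ∀ row ∈ d, row.length = (n + 2).toNat

def removedCells (walls : List (List Int)) (c : List Int) : List (Int × Int) :=
  c.map (fun i => (wallR walls i, wallC walls i))

lemma pyGetD_pair0 (a b d : Int) : PySem.List.pyGetD [a, b] 0 d = a := rfl
lemma pyGetD_pair1 (a b d : Int) : PySem.List.pyGetD [a, b] 1 d = b := rfl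

lemma get2_nonneg (b : List (List Int)) (r c : Int) (hr : 0 ≤ r) (hc : 0 ≤ c) :
    get2 b r c = (b.getD r.toNat []).getD c.toNat 0 := by
  unfold get2
  rw [PySem.List.pyGetD_of_nonneg _ _ hr, PySem.List.pyGetD_of_nonneg _ _ hc]

lemma length_set2 (b : List (List Int)) (r c v : Int) : (set2 b r c v).length = b.length := by
  unfold set2; exact PySem.List.length_pySetD _ _ _

lemma pyIdx?_lt {m : Nat} {i : Int} {k : Nat} (h : PySem.List.pyIdx? m i = some k) : k < m := by
  unfold PySem.List.pyIdx? at h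
  split_ifs at h <;> simp_all <;> omega

lemma pySetD_none {α : Type} (b : List α) (r : Int) (x : α)
    (hk : PySem.List.pyIdx? b.length r = none) : PySem.List.pySetD b r x = b := by
  unfold PySem.List.pySetD PySem.List.pySet?
  rw [hk]; rfl

lemma pySetD_some {α : Type} (b : List α) (r : Int) (x : α) {j : Nat}
    (hk : PySem.List.pyIdx? b.length r = some j) : PySem.List.pySetD b r x = b.set j x := by
  unfold PySem.List.pySetD PySem.List.pySet?
  rw [hk]; rfl

lemma pyGetD_some {α : Type} (b : List α) (r : Int) (d : α) {j : Nat}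
    (hk : PySem.List.pyIdx? b.length r = some j) (hj : j < b.length) :
    PySem.List.pyGetD b r d = b[j] := by
  unfold PySem.List.pyGetD PySem.List.pyGet?
  rw [hk]
  simp [List.getElem?_eq_getElem hj]

lemma shape_set2 {n : Int} {b : List (List Int)} (h : Shape n b) (r c v : Int) :
    Shape n (set2 b r c v) := by
  obtain ⟨h1, h2⟩ := h
  refine ⟨by rw [length_set2, h1], ?_⟩
  intro row hrow
  unfold set2 at hrow
  cases hk : PySem.List.pyIdx? b.length r with
  | none => rw [pySetD_none _ _ _ hk] at hrow; exact h2 row hrow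
  | some j =>
    have hj := pyIdx?_lt hk
    rw [pySetD_some _ _ _ hk] at hrow
    rcases List.mem_or_eq_of_mem_set hrow with hmem | heq
    · exact h2 row hmem
    · subst heq
      rw [PySem.List.length_pySetD, pyGetD_some _ _ _ hk hj]
      exact h2 _ (List.getElem_mem hj)

lemma get2_set2_self {n : Int} {b : List (List Int)} (h : Shape n b) {r c : Int} (v : Int)
    (hr0 : 0 ≤ r) (hr1 : r < n + 2) (hc0 : 0 ≤ c) (hc1 : c < n + 2) :
    get2 (set2 b r c v) r c = v := by
  obtain ⟨h1, h2⟩ := h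
  have hrlen : r.toNat < b.length := by omega
  have hrow : PySem.List.pyGetD b r [] = b[r.toNat] := by
    rw [PySem.List.pyGetD_of_nonneg _ _ hr0, List.getD_eq_getElem _ _ hrlen]
  have hclen : c.toNat < (b[r.toNat]).length := by
    rw [h2 _ (List.getElem_mem hrlen)]; omega
  unfold set2
  rw [hrow, PySem.List.pySetD_of_nonneg _ _ hr0, PySem.List.pySetD_of_nonneg _ _ hc0,
    get2_nonneg _ _ _ hr0 hc0]
  have e1 : (b.set r.toNat (b[r.toNat].set c.toNat v)).getD r.toNat [] = b[r.toNat].set c.toNat v := by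
    rw [List.getD_eq_getElem _ _ (by simpa using hrlen)]
    exact List.getElem_set_self _
  rw [e1, List.getD_eq_getElem _ _ (by simpa using hclen)]
  exact List.getElem_set_self _

lemma get2_set2_ne {n : Int} {b : List (List Int)} (h : Shape n b) {r c : Int} (v : Int)
    (hr0 : 0 ≤ r) (hr1 : r < n + 2) (hc0 : 0 ≤ c) (hc1 : c < n + 2)
    {r' c' : Int} (hr' : 0 ≤ r') (hc' : 0 ≤ c')
    (hne : (r', c') ≠ (r, c)) :
    get2 (set2 b r c v) r' c' = get2 b r' c' := by
  obtain ⟨h1, h2⟩ := h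
  have hrlen : r.toNat < b.length := by omega
  have hrow : PySem.List.pyGetD b r [] = b[r.toNat] := by
    rw [PySem.List.pyGetD_of_nonneg _ _ hr0, List.getD_eq_getElem _ _ hrlen]
  unfold set2
  rw [hrow, PySem.List.pySetD_of_nonneg _ _ hr0, PySem.List.pySetD_of_nonneg _ _ hc0,
    get2_nonneg _ _ _ hr' hc', get2_nonneg _ _ _ hr' hc']
  by_cases hrr : r'.toNat = r.toNat
  · have hrr' : r' = r := by omega
    have hcc : c' ≠ c := fun hc => hne (by rw [hrr', hc])
    have hccN : c'.toNat ≠ c.toNat := by omega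
    have e1 : (b.set r.toNat (b[r.toNat].set c.toNat v)).getD r'.toNat [] = b[r.toNat].set c.toNat v := by
      rw [hrr, List.getD_eq_getElem _ _ (by simpa using hrlen)]
      exact List.getElem_set_self _
    have e2 : b.getD r'.toNat [] = b[r.toNat] := by
      rw [hrr, List.getD_eq_getElem _ _ hrlen]
    rw [e1, e2]
    unfold List.getD
    rw [List.getElem?_set_ne (by omega)]
  · have e1 : (b.set r.toNat (b[r.toNat].set c.toNat v)).getD r'.toNat [] = b.getD r'.toNat [] := by
      unfold List.getD
      rw [List.getElem?_set_ne (by omega)]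
    rw [e1]

lemma get2_replicate {m : Nat} {v : Int} {r c : Int} (hr0 : 0 ≤ r) (hr1 : r.toNat < m)
    (hc0 : 0 ≤ c) (hc1 : c.toNat < m) :
    get2 (List.replicate m (List.replicate m v)) r c = v := by
  rw [get2_nonneg _ _ _ hr0 hc0]
  unfold List.getD
  rw [List.getElem?_replicate_of_lt hr1, Option.getD_some,
    List.getElem?_replicate_of_lt hc1, Option.getD_some]

lemma shape_replicate {n : Int} : Shape n (List.replicate (n + 2).toNat (List.replicate (n + 2).toNat (n * n))) := by
  constructor
  · simp
  · intro row hrow; simp_all [List.eq_of_mem_replicate hrow]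

lemma board_ext {n : Int} {b1 b2 : List (List Int)} (h1 : Shape n b1) (h2 : Shape n b2)
    (h : ∀ r c : Int, 0 ≤ r → r < n + 2 → 0 ≤ c → c < n + 2 → get2 b1 r c = get2 b2 r c) :
    b1 = b2 := by
  have hlen : b1.length = b2.length := by rw [h1.1, h2.1]
  apply List.ext_getElem hlen
  intro i hi1 hi2
  have hrl1 : (b1[i]).length = (n + 2).toNat := h1.2 _ (List.getElem_mem hi1)
  have hrl2 : (b2[i]).length = (n + 2).toNat := h2.2 _ (List.getElem_mem hi2)
  apply List.ext_getElem (by rw [hrl1, hrl2])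
  intro j hj1 hj2
  have hi' : (i : Int) < n + 2 := by rw [h1.1] at hi1; omega
  have hj' : (j : Int) < n + 2 := by rw [hrl1] at hj1; omega
  have := h i j (by positivity) hi' (by positivity) hj'
  rw [get2_nonneg _ _ _ (by positivity) (by positivity),
    get2_nonneg _ _ _ (by positivity) (by positivity)] at this
  simp only [Int.toNat_natCast] at this
  rw [List.getD_eq_getElem _ _ hi1, List.getD_eq_getElem _ _ hi2,
    List.getD_eq_getElem _ _ hj1, List.getD_eq_getElem _ _ hj2] at this
  exact this

-- board modification: setting every cell of `cells` to v
lemma get2_foldl_set {walls : List (List Int)} (cs : List Int) (v : Int)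
    (b : List (List Int)) {n : Int} (hb : Shape n b)
    (hvalid : ∀ i ∈ cs, 0 ≤ wallR walls i ∧ wallR walls i < n + 2 ∧ 0 ≤ wallC walls i ∧ wallC walls i < n + 2)
    (r c : Int) (hr : 0 ≤ r) (hc : 0 ≤ c) :
    get2 (cs.foldl (fun bd w => set2 bd (wallR walls w) (wallC walls w) v) b) r c
      = if (r, c) ∈ removedCells walls cs then v else get2 b r c := by
  induction cs generalizing b with
  | nil => simp [removedCells]
  | cons i cs ih =>
    obtain ⟨hwr0, hwr1, hwc0, hwc1⟩ := hvalid i (by simp)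
    have hcells : removedCells walls (i :: cs)
        = (wallR walls i, wallC walls i) :: removedCells walls cs := rfl
    rw [List.foldl_cons, ih _ (shape_set2 hb _ _ _) (fun j hj => hvalid j (List.mem_cons_of_mem _ hj)),
      hcells]
    by_cases hmem : (r, c) ∈ removedCells walls cs
    · simp [hmem]
    · by_cases heq : (r, c) = (wallR walls i, wallC walls i)
      · rw [if_neg hmem, if_pos (by simp [heq])]
        rw [Prod.mk.injEq] at heq
        rw [heq.1, heq.2]
        exact get2_set2_self hb v hwr0 hwr1 hwc0 hwc1
      · rw [if_neg hmem, if_neg (fun hx => (List.mem_cons.mp hx).elim heq hmem),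
          get2_set2_ne hb v hwr0 hwr1 hwc0 hwc1 hr hc heq]

lemma shape_foldl_set {walls : List (List Int)} (cs : List Int) (v : Int)
    (b : List (List Int)) {n : Int} (hb : Shape n b) :
    Shape n (cs.foldl (fun bd w => set2 bd (wallR walls w) (wallC walls w) v) b) := by
  induction cs generalizing b with
  | nil => exact hb
  | cons i cs ih => exact ih _ (shape_set2 hb _ _ _)

lemma combosB_zero (items : List Int) : combosB items 0 = [[]] := by
  rw [combosB.eq_def]; simp

lemma combosB_nil {k : Int} (h : k ≠ 0) : combosB [] k = [] := by
  rw [combosB.eq_def]; simp [h]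

lemma combosB_cons {x : Int} {rest : List Int} {k : Int} (h : k ≠ 0) :
    combosB (x :: rest) k = (combosB rest (k - 1)).map (fun t => x :: t) ++ combosB rest k := by
  rw [combosB.eq_def]; simp [h]

lemma combosB_empty : ∀ (items : List Int) (k : Int),
    (k < 0 ∨ (items.length : Int) < k) → combosB items k = [] := by
  intro items
  induction items with
  | nil =>
    intro k hk
    refine combosB_nil ?_
    simp only [List.length_nil, Nat.cast_zero] at hk
    omega
  | cons x rest ih =>
    intro k hk
    simp only [List.length_cons, Nat.cast_add, Nat.cast_one] at hk
    have hk0 : k ≠ 0 := by omega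
    rw [combosB_cons hk0, ih (k - 1) (by omega), ih k (by omega)]
    simp

-- A's pick versus B's structural combinations
lemma pickA_eq (w k : Int) : ∀ (f : Nat) (cur : Int) (picked : List Int) (comb : List (List Int)),
    cur ≤ w → (w - cur).toNat < f →
    pickA w k f cur picked comb
      = comb ++ (combosB (PySem.List.pyRange cur w 1) (k - picked.length)).map (fun t => picked ++ t) := by
  intro f
  induction f with
  | zero => intro cur picked comb _ h; omega
  | succ f ih =>
    intro cur picked comb hcw hf
    by_cases hpk : (picked.length : Int) = k
    · have hk0 : k - (picked.length : Int) = 0 := by omega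
      rw [hk0, combosB_zero]
      simp [pickA, hpk]
    · by_cases hcur : cur = w
      · subst hcur
        have hrange : PySem.List.pyRange cur cur 1 = [] := by
          simp [PySem.List.pyRange]
        have hknz : k - (picked.length : Int) ≠ 0 := by omega
        rw [hrange]
        simp [pickA, hpk, combosB_nil hknz]
      · have hlt : cur < w := lt_of_le_of_ne hcw hcur
        have hstep : PySem.List.pyRange cur w 1 = cur :: PySem.List.pyRange (cur + 1) w 1 :=
          PySem.List.pyRange_one_cons hlt
        have hknz : k - (picked.length : Int) ≠ 0 := by omega
        have h1 := ih (cur + 1) (picked ++ [cur]) comb (by omega) (by omega)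
        have h2 := ih (cur + 1) picked
          (comb ++ (combosB (PySem.List.pyRange (cur + 1) w 1) (k - ((picked ++ [cur]).length : Int))).map
            (fun t => (picked ++ [cur]) ++ t)) (by omega) (by omega)
        simp only [pickA, hpk, hcur, if_false]
        rw [h1, h2, hstep]
        rw [combosB_cons hknz, List.map_append, List.map_map]
        have harith : k - ((picked ++ [cur]).length : Int) = k - (picked.length : Int) - 1 := by
          simp
          omega
        rw [harith, List.append_assoc]
        congr 2
        ext t
        simp [Function.comp]

lemma mem_combosB {items : List Int} {k : Int} {t : List Int} (ht : t ∈ combosB items k) :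
    ∀ x ∈ t, x ∈ items := by
  induction items generalizing k t with
  | nil =>
    rw [combosB.eq_def] at ht
    split_ifs at ht with h
    · simp at ht; subst ht; simp
    · simp at ht
  | cons y rest ih =>
    rw [combosB.eq_def] at ht
    split_ifs at ht with h
    · simp at ht; subst ht; simp
    · simp only [List.mem_append, List.mem_map] at ht
      rcases ht with ⟨t', ht', rfl⟩ | ht
      · intro x hx
        rcases List.mem_cons.mp hx with rfl | hx'
        · simp
        · exact List.mem_cons_of_mem _ (ih ht' _ hx')
      · intro x hx
        exact List.mem_cons_of_mem _ (ih ht _ hx)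

-- the BFS simulation invariant
structure BfsInv (n : Int) (dist : List (List Int)) (vis : List (Int × Int))
    (remCur nxt : List (Int × Int)) (S : Int) : Prop where
  shape : Shape n dist
  visInt : ∀ p ∈ vis, interP n p
  nodup : vis.Nodup
  hV : ∀ p : Int × Int, interP n p → (p ∈ vis ↔ get2 dist p.1 p.2 ≠ n * n)
  hrem : ∀ p ∈ remCur, p ∈ vis ∧ get2 dist p.1 p.2 = S - 1
  hnxt : ∀ p ∈ nxt, p ∈ vis ∧ get2 dist p.1 p.2 = S
  hlev : ∀ j : Int, 0 ≤ j → j ≤ S - 1 → ∃ p ∈ vis, get2 dist p.1 p.2 = j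
  hS : 1 ≤ S

lemma vis_card {n : Int} (hn : 1 ≤ n) {vis : List (Int × Int)}
    (hint : ∀ p ∈ vis, interP n p) (hnd : vis.Nodup) :
    vis.length ≤ n.toNat ^ 2 := by
  classical
  have hsub : vis.toFinset ⊆ (Finset.Icc (1 : Int) n) ×ˢ (Finset.Icc (1 : Int) n) := by
    intro p hp
    obtain ⟨a1, a2, a3, a4⟩ := hint p (List.mem_toFinset.mp hp)
    simp [Finset.mem_product, Finset.mem_Icc]
    omega
  have hcard := Finset.card_le_card hsub
  rw [List.toFinset_card_of_nodup hnd, Finset.card_product, Int.card_Icc] at hcard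
  have : (n + 1 - 1).toNat = n.toNat := by omega
  rw [this] at hcard
  nlinarith [hcard]

lemma lev_card {n : Int} {dist : List (List Int)} {vis : List (Int × Int)} {S : Int}
    (hnd : vis.Nodup) (hS : 1 ≤ S)
    (hlev : ∀ j : Int, 0 ≤ j → j ≤ S - 1 → ∃ p ∈ vis, get2 dist p.1 p.2 = j) :
    S.toNat ≤ vis.length := by
  classical
  have hsub : Finset.Icc (0 : Int) (S - 1) ⊆ vis.toFinset.image (fun p => get2 dist p.1 p.2) := by
    intro j hj
    rw [Finset.mem_Icc] at hj
    obtain ⟨p, hp, hv⟩ := hlev j hj.1 hj.2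
    exact Finset.mem_image.mpr ⟨p, List.mem_toFinset.mpr hp, hv⟩
  have h1 := Finset.card_le_card hsub
  have h2 := Finset.card_image_le (s := vis.toFinset) (f := fun p => get2 dist p.1 p.2)
  rw [Int.card_Icc] at h1
  rw [List.toFinset_card_of_nodup hnd] at h2
  omega

lemma toNat_sq {n : Int} (hn : 1 ≤ n) : (n * n).toNat = n.toNat ^ 2 := by
  have h2 : ((n.toNat : Int)) = n := Int.toNat_of_nonneg (by omega)
  have : (((n.toNat ^ 2 : Nat)) : Int) = n * n := by push_cast [h2]; ring
  omega

-- adding a freshly discovered cell p at level S preserves the invariant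
lemma inv_add {n : Int} {dist : List (List Int)} {vis rest nxt : List (Int × Int)} {S : Int}
    (hn : 1 ≤ n) (hInv : BfsInv n dist vis rest nxt S) {p : Int × Int}
    (hpInt : interP n p) (hpNot : p ∉ vis) :
    BfsInv n (set2 dist p.1 p.2 S) (vis ++ [p]) rest (nxt ++ [p]) S := by
  obtain ⟨hsh, hintv, hnd, hV, hrem, hnxt, hlev, hS⟩ := hInv
  obtain ⟨hp1, hp2, hp3, hp4⟩ := hpInt
  have hnd' : (vis ++ [p]).Nodup := by
    simp [List.nodup_append, hnd]
    exact fun a b hab he => hpNot (he ▸ hab)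
  have hint' : ∀ q ∈ vis ++ [p], interP n q := by
    intro q hq
    rcases List.mem_append.mp hq with h | h
    · exact hintv q h
    · simp at h; subst h; exact ⟨hp1, hp2, hp3, hp4⟩
  have hcard1 : (vis ++ [p]).length ≤ n.toNat ^ 2 := vis_card hn hint' hnd'
  have hSvis : S.toNat ≤ vis.length := lev_card (n := n) hnd hS hlev
  have hSlt : S < n * n := by
    have hx : (vis.length + 1 : Nat) ≤ n.toNat ^ 2 := by simpa using hcard1
    have hnn := toNat_sq hn
    omega
  have hSne : S ≠ n * n := by omega
  have hpr0 : (0 : Int) ≤ p.1 := by omega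
  have hpr1 : p.1 < n + 2 := by omega
  have hpc0 : (0 : Int) ≤ p.2 := by omega
  have hpc1 : p.2 < n + 2 := by omega
  have hself : get2 (set2 dist p.1 p.2 S) p.1 p.2 = S :=
    get2_set2_self hsh S hpr0 hpr1 hpc0 hpc1
  have hne : ∀ q : Int × Int, interP n q → q ≠ p →
      get2 (set2 dist p.1 p.2 S) q.1 q.2 = get2 dist q.1 q.2 := by
    intro q hq hqp
    obtain ⟨a1, a2, a3, a4⟩ := hq
    exact get2_set2_ne hsh S hpr0 hpr1 hpc0 hpc1 (by omega) (by omega)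
      (by simpa [Prod.ext_iff] using hqp)
  refine ⟨shape_set2 hsh _ _ _, hint', hnd', ?_, ?_, ?_, ?_, hS⟩
  · intro q hq
    by_cases hqp : q = p
    · subst hqp
      rw [hself]
      simp [hSne]
    · rw [hne q hq hqp]
      have : q ∈ vis ++ [p] ↔ q ∈ vis := by simp [hqp]
      rw [this]
      exact hV q hq
  · intro q hq
    obtain ⟨hq1, hq2⟩ := hrem q hq
    have hqp : q ≠ p := fun h => hpNot (h ▸ hq1)
    exact ⟨List.mem_append_left _ hq1, by rw [hne q (hintv q hq1) hqp]; exact hq2⟩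
  · intro q hq
    rcases List.mem_append.mp hq with h | h
    · obtain ⟨hq1, hq2⟩ := hnxt q h
      have hqp : q ≠ p := fun h' => hpNot (h' ▸ hq1)
      exact ⟨List.mem_append_left _ hq1, by rw [hne q (hintv q hq1) hqp]; exact hq2⟩
    · simp at h; subst h
      exact ⟨List.mem_append_right _ (by simp), hself⟩
  · intro j hj0 hj1
    obtain ⟨q, hq, hqv⟩ := hlev j hj0 hj1
    have hqp : q ≠ p := fun h => hpNot (h ▸ hq)
    exact ⟨q, List.mem_append_left _ hq, by rw [hne q (hintv q hq) hqp]; exact hqv⟩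

-- moving to the next BFS level preserves the invariant
lemma inv_switch {n : Int} {dist : List (List Int)} {vis nxt : List (Int × Int)} {S : Int}
    (hInv : BfsInv n dist vis ([] : List (Int × Int)) nxt S) (hne : nxt ≠ []) :
    BfsInv n dist vis nxt ([] : List (Int × Int)) (S + 1) := by
  obtain ⟨hsh, hintv, hnd, hV, hrem, hnxt, hlev, hS⟩ := hInv
  refine ⟨hsh, hintv, hnd, hV, ?_, by simp, ?_, by omega⟩
  · intro q hq
    obtain ⟨h1, h2⟩ := hnxt q hq
    exact ⟨h1, by rw [h2]; ring⟩
  · intro j hj0 hj1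
    by_cases hjS : j = S
    · subst hjS
      obtain ⟨q, hq⟩ := List.exists_mem_of_ne_nil nxt hne
      exact ⟨q, (hnxt q hq).1, (hnxt q hq).2⟩
    · exact hlev j hj0 (by omega)

def DirsRel : List (List Int) → List (Int × Int) → Prop :=
  List.Forall₂ (fun d p => d = [p.1, p.2] ∧ -1 ≤ p.1 ∧ p.1 ≤ 1 ∧ -1 ≤ p.2 ∧ p.2 ≤ 1)

lemma dirsRel_dirs : DirsRel dirsA dirsB := by
  unfold DirsRel dirsA dirsB
  repeat' constructor <;> norm_num

lemma simDirs {n : Int} {bdA bd : List (List Int)} {removed : PySem.Set (Int × Int)}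
    {e0 e1 : Int} (hn : 1 ≤ n)
    (hopen : ∀ r c : Int, 0 ≤ r → r ≤ n + 1 → 0 ≤ c → c ≤ n + 1 →
      (get2 bdA r c = 0 ↔ (get2 bd r c = 0 ∨ (r, c) ∈ removed)))
    (hclosed : ∀ r c : Int, 0 ≤ r → r ≤ n + 1 → 0 ≤ c → c ≤ n + 1 →
      get2 bdA r c = 0 → interP n (r, c)) :
    ∀ (ds : List (List Int)) (dsB : List (Int × Int)), DirsRel ds dsB →
    ∀ (dist : List (List Int)) (vis : PySem.Set (Int × Int))
      (rest nxt : List (Int × Int)) (S r c : Int),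
    BfsInv n dist vis rest nxt S → interP n (r, c) → (r, c) ∈ vis → get2 dist r c = S - 1 →
    (∃ a, stepDirsA bdA (n * n) [e0, e1] [r, c] ds ((rest ++ nxt).map toL) dist = .inl a ∧
          dirLoopB bd removed (e0, e1) S r c dsB nxt vis = .inl a) ∨
    (∃ (t : List (Int × Int)) (dist' : List (List Int)),
          stepDirsA bdA (n * n) [e0, e1] [r, c] ds ((rest ++ nxt).map toL) dist
            = .inr (((rest ++ (nxt ++ t)).map toL), dist') ∧
          dirLoopB bd removed (e0, e1) S r c dsB nxt vis = .inr (nxt ++ t, vis ++ t) ∧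
          BfsInv n dist' (vis ++ t) rest (nxt ++ t) S ∧ get2 dist' r c = S - 1) := by
  intro ds dsB hrel
  induction hrel with
  | nil =>
    intro dist vis rest nxt S r c hInv hint hvis hcur
    right
    exact ⟨[], dist, by simp [stepDirsA], by simp [dirLoopB], by simpa using hInv, hcur⟩
  | @cons d p ds' dsB' hdp hrel' ih =>
    intro dist vis rest nxt S r c hInv hint hvis hcur
    obtain ⟨dr, dc⟩ := p
    obtain ⟨hd, hdr0, hdr1, hdc0, hdc1⟩ := hdp
    subst hd
    obtain ⟨hint1, hint2, hint3, hint4⟩ := hint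
    have hr0 : (0 : Int) ≤ r + dr := by omega
    have hr1 : r + dr ≤ n + 1 := by omega
    have hc0 : (0 : Int) ≤ c + dc := by omega
    have hc1 : c + dc ≤ n + 1 := by omega
    have hstepA : stepDirsA bdA (n * n) [e0, e1] [r, c] ([dr, dc] :: ds')
        ((rest ++ nxt).map toL) dist
        = (if get2 bdA (r + dr) (c + dc) = 0 ∧ get2 dist (r + dr) (c + dc) = n * n then
            (if [r + dr, c + dc] = [e0, e1] then
              Sum.inl (get2 (set2 dist (r + dr) (c + dc) (get2 dist r c + 1)) (r + dr) (c + dc))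
            else stepDirsA bdA (n * n) [e0, e1] [r, c] ds'
                (((rest ++ nxt).map toL) ++ [[r + dr, c + dc]])
                (set2 dist (r + dr) (c + dc) (get2 dist r c + 1)))
          else stepDirsA bdA (n * n) [e0, e1] [r, c] ds' ((rest ++ nxt).map toL) dist) := by
      simp only [stepDirsA, pyGetD_pair0, pyGetD_pair1]
    have hstepB : dirLoopB bd removed (e0, e1) S r c ((dr, dc) :: dsB') nxt vis
        = (if (get2 bd (r + dr) (c + dc) = 0 ∨ ((r + dr, c + dc) : Int × Int) ∈ removed) ∧
              ((r + dr, c + dc) : Int × Int) ∉ vis then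
            (if ((r + dr, c + dc) : Int × Int) = (e0, e1) then Sum.inl S
            else dirLoopB bd removed (e0, e1) S r c dsB' (nxt ++ [(r + dr, c + dc)])
                (PySem.Set.add vis (r + dr, c + dc)))
          else dirLoopB bd removed (e0, e1) S r c dsB' nxt vis) := by
      simp only [dirLoopB]
    have hiff : (get2 bdA (r + dr) (c + dc) = 0 ∧ get2 dist (r + dr) (c + dc) = n * n)
        ↔ ((get2 bd (r + dr) (c + dc) = 0 ∨ ((r + dr, c + dc) : Int × Int) ∈ removed) ∧
            ((r + dr, c + dc) : Int × Int) ∉ vis) := by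
      constructor
      · rintro ⟨ho, hdst⟩
        have hop := (hopen _ _ hr0 hr1 hc0 hc1).mp ho
        have hpI := hclosed _ _ hr0 hr1 hc0 hc1 ho
        refine ⟨hop, fun hmem => ?_⟩
        exact ((hInv.hV _ hpI).mp hmem) hdst
      · rintro ⟨hop, hnm⟩
        have ho := (hopen _ _ hr0 hr1 hc0 hc1).mpr hop
        have hpI := hclosed _ _ hr0 hr1 hc0 hc1 ho
        refine ⟨ho, ?_⟩
        by_contra hne
        exact hnm ((hInv.hV _ hpI).mpr hne)
    by_cases hA : get2 bdA (r + dr) (c + dc) = 0 ∧ get2 dist (r + dr) (c + dc) = n * n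
    · have hB := hiff.mp hA
      rw [hstepA, hstepB, if_pos hA, if_pos hB]
      have hpI : interP n (r + dr, c + dc) := hclosed _ _ hr0 hr1 hc0 hc1 hA.1
      have hval : get2 dist r c + 1 = S := by rw [hcur]; ring
      rw [hval]
      have hInv' := inv_add hn hInv hpI hB.2
      have hpne : ((r, c) : Int × Int) ≠ (r + dr, c + dc) := by
        intro h
        exact hB.2 (h ▸ hvis)
      have hself : get2 (set2 dist (r + dr) (c + dc) S) (r + dr) (c + dc) = S :=
        get2_set2_self hInv.shape S (by omega) (by obtain ⟨a,b,c',d⟩ := hpI; omega)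
          (by omega) (by obtain ⟨a,b,c',d⟩ := hpI; omega)
      have hcur' : get2 (set2 dist (r + dr) (c + dc) S) r c = S - 1 := by
        rw [get2_set2_ne hInv.shape S (by omega) (by obtain ⟨a,b,c',d⟩ := hpI; omega)
          (by omega) (by obtain ⟨a,b,c',d⟩ := hpI; omega) (by omega) (by omega) hpne]
        exact hcur
      by_cases he : ((r + dr, c + dc) : Int × Int) = (e0, e1)
      · left
        refine ⟨S, ?_, ?_⟩
        · rw [if_pos ?_, hself]
          rw [Prod.mk.injEq] at he
          simp [he.1, he.2]
        · rw [if_pos he]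
      · rw [if_neg (by
            intro hl
            simp only [List.cons.injEq, and_true] at hl
            exact he (by rw [Prod.mk.injEq]; exact ⟨hl.1, hl.2⟩)), if_neg he,
          PySem.Set.add_of_not_mem hB.2]
        have hqq : ((rest ++ nxt).map toL) ++ [[r + dr, c + dc]]
            = (rest ++ (nxt ++ [(r + dr, c + dc)])).map toL := by
          simp [toL]
        rw [hqq]
        rcases ih (set2 dist (r + dr) (c + dc) S) (vis ++ [(r + dr, c + dc)]) rest
            (nxt ++ [(r + dr, c + dc)]) S r c hInv' ⟨hint1, hint2, hint3, hint4⟩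
            (List.mem_append_left _ hvis) hcur' with
          ⟨a, hA', hB'⟩ | ⟨t, dist'', hA', hB', hInv'', hcur''⟩
        · exact Or.inl ⟨a, hA', hB'⟩
        · right
          refine ⟨(r + dr, c + dc) :: t, dist'', ?_, ?_, ?_, hcur''⟩
          · rw [hA']
            simp
          · rw [hB']
            simp
          · simpa using hInv''
    · rw [hstepA, hstepB, if_neg hA, if_neg (fun h => hA (hiff.mpr h))]
      exact ih dist vis rest nxt S r c hInv ⟨hint1, hint2, hint3, hint4⟩ hvis hcur

lemma simMain {n : Int} {bdA bd : List (List Int)} {removed : PySem.Set (Int × Int)}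
    {e0 e1 : Int} (hn : 1 ≤ n)
    (hopen : ∀ r c : Int, 0 ≤ r → r ≤ n + 1 → 0 ≤ c → c ≤ n + 1 →
      (get2 bdA r c = 0 ↔ (get2 bd r c = 0 ∨ (r, c) ∈ removed)))
    (hclosed : ∀ r c : Int, 0 ≤ r → r ≤ n + 1 → 0 ≤ c → c ≤ n + 1 →
      get2 bdA r c = 0 → interP n (r, c)) :
    ∀ (m fA fB : Nat) (dist : List (List Int)) (vis : PySem.Set (Int × Int))
      (remCur nxt : List (Int × Int)) (S : Int),
    BfsInv n dist vis remCur nxt S →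
    fA + fB ≤ m →
    1 + remCur.length + nxt.length + (n.toNat ^ 2 - vis.length) ≤ fA →
    1 + (n.toNat ^ 2 + 1 - S.toNat) ≤ fB →
    loopA bdA (n * n) [e0, e1] fA ((remCur ++ nxt).map toL) dist
      = (match cellLoopB bd removed (e0, e1) S remCur nxt vis with
         | .inl a => a
         | .inr (nxt', vis') => levelLoopB bd n removed (e0, e1) fB nxt' vis' S) := by
  intro m
  induction m with
  | zero =>
    intro fA fB dist vis remCur nxt S hInv hm hfA hfB
    omega
  | succ m ih =>
    intro fA fB dist vis remCur nxt S hInv hm hfA hfB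
    have hSvis : S.toNat ≤ vis.length := lev_card (n := n) hInv.nodup hInv.hS hInv.hlev
    have hvisN : vis.length ≤ n.toNat ^ 2 := vis_card hn hInv.visInt hInv.nodup
    obtain ⟨fA, rfl⟩ : ∃ f', fA = f' + 1 := ⟨fA - 1, by omega⟩
    rcases remCur with _ | ⟨⟨r, c⟩, rest⟩
    · simp only [cellLoopB]
      rcases nxt with _ | ⟨q0, qs⟩
      · obtain ⟨fB, rfl⟩ : ∃ f', fB = f' + 1 := ⟨fB - 1, by omega⟩
        simp only [List.append_nil, List.map_nil, loopA, levelLoopB]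
        simp
      · obtain ⟨fB, rfl⟩ : ∃ f', fB = f' + 1 := ⟨fB - 1, by omega⟩
        have hinv' := inv_switch hInv (by simp)
        rw [show levelLoopB bd n removed (e0, e1) (fB + 1) (q0 :: qs) vis S
            = (match cellLoopB bd removed (e0, e1) (S + 1) (q0 :: qs) [] vis with
               | .inl a => a
               | .inr (nxt', vis') => levelLoopB bd n removed (e0, e1) fB nxt' vis' (S + 1))
          from by simp only [levelLoopB, if_neg (List.cons_ne_nil q0 qs)]]
        rw [show (([] : List (Int × Int)) ++ (q0 :: qs)).map toL
            = (((q0 :: qs) ++ []).map toL) by simp]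
        exact ih (fA + 1) fB dist vis (q0 :: qs) [] (S + 1) hinv' (by omega)
          (by simp at hfA ⊢; omega) (by have hS1 := hInv.hS; omega)
    · have hhead := hInv.hrem (r, c) (by simp)
      have hint : interP n (r, c) := hInv.visInt _ hhead.1
      have hInvR : BfsInv n dist vis rest nxt S :=
        ⟨hInv.shape, hInv.visInt, hInv.nodup, hInv.hV,
         fun p hp => hInv.hrem p (List.mem_cons_of_mem _ hp), hInv.hnxt, hInv.hlev, hInv.hS⟩
      rw [show (((r, c) :: rest ++ nxt).map toL) = [r, c] :: ((rest ++ nxt).map toL) from rfl]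
      simp only [loopA, cellLoopB]
      rcases simDirs hn hopen hclosed dirsA dirsB dirsRel_dirs dist vis rest nxt S r c
          hInvR hint hhead.1 hhead.2 with
        ⟨a, hA', hB'⟩ | ⟨t, dist', hA', hB', hInv'', hcur''⟩
      · rw [hA', hB']
      · rw [hA', hB']
        have hlen : (vis ++ t).length ≤ n.toNat ^ 2 := vis_card hn hInv''.visInt hInv''.nodup
        rw [List.length_append] at hlen
        exact ih fA fB dist' (vis ++ t) rest (nxt ++ t) S hInv'' (by omega)
          (by simp only [List.length_append]; simp at hfA; omega) hfB

lemma bfs_eq {n : Int} {bdA bd : List (List Int)} {removed : PySem.Set (Int × Int)}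
    {s0 s1 e0 e1 : Int} (hn : 1 ≤ n)
    (hopen : ∀ r c : Int, 0 ≤ r → r ≤ n + 1 → 0 ≤ c → c ≤ n + 1 →
      (get2 bdA r c = 0 ↔ (get2 bd r c = 0 ∨ (r, c) ∈ removed)))
    (hclosed : ∀ r c : Int, 0 ≤ r → r ≤ n + 1 → 0 ≤ c → c ≤ n + 1 →
      get2 bdA r c = 0 → interP n (r, c))
    (hs : interP n (s0, s1)) :
    bfsA bdA n [s0, s1] [e0, e1] = bfsB bd n removed [s0, s1] [e0, e1] := by
  obtain ⟨hs1, hs2, hs3, hs4⟩ := hs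
  have hnn0 : (0 : Int) < n * n := by nlinarith
  have hsq := toNat_sq hn
  have hshape0 : Shape n (List.replicate (n + 2).toNat (List.replicate (n + 2).toNat (n * n))) :=
    shape_replicate
  have hInv0 : BfsInv n
      (set2 (List.replicate (n + 2).toNat (List.replicate (n + 2).toNat (n * n))) s0 s1 0)
      [(s0, s1)] [(s0, s1)] [] 1 := by
    refine ⟨shape_set2 hshape0 _ _ _, ?_, by simp, ?_, ?_, by simp, ?_, le_refl 1⟩
    · intro q hq
      simp at hq
      subst hq
      exact ⟨hs1, hs2, hs3, hs4⟩
    · intro q hq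
      by_cases hqp : q = (s0, s1)
      · subst hqp
        rw [show get2 (set2 (List.replicate (n + 2).toNat (List.replicate (n + 2).toNat (n * n)))
            s0 s1 0) s0 s1 = 0 from
          get2_set2_self hshape0 0 (by omega) (by omega) (by omega) (by omega)]
        simp
        omega
      · obtain ⟨a1, a2, a3, a4⟩ := hq
        rw [get2_set2_ne hshape0 0 (by omega) (by omega) (by omega) (by omega)
            (by omega) (by omega) (by simpa [Prod.ext_iff] using hqp),
          get2_replicate (by omega) (by omega) (by omega) (by omega)]
        simp [hqp]
    · intro q hq
      simp at hq
      subst hq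
      refine ⟨by simp, ?_⟩
      rw [show ((s0, s1) : Int × Int).1 = s0 from rfl, show ((s0, s1) : Int × Int).2 = s1 from rfl]
      rw [get2_set2_self hshape0 0 (by omega) (by omega) (by omega) (by omega)]
      ring
    · intro j hj0 hj1
      have hj : j = 0 := by omega
      subst hj
      refine ⟨(s0, s1), by simp, ?_⟩
      rw [show ((s0, s1) : Int × Int).1 = s0 from rfl, show ((s0, s1) : Int × Int).2 = s1 from rfl]
      exact get2_set2_self hshape0 0 (by omega) (by omega) (by omega) (by omega)
  have hmain := simMain (e0 := e0) (e1 := e1) hn hopen hclosed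
    (((n + 2).toNat * (n + 2).toNat + 2) + ((n * n).toNat + 1))
    ((n + 2).toNat * (n + 2).toNat + 2) ((n * n).toNat + 1)
    (set2 (List.replicate (n + 2).toNat (List.replicate (n + 2).toNat (n * n))) s0 s1 0)
    [(s0, s1)] [(s0, s1)] [] 1 hInv0 (le_refl _)
    (by
      have h2 : (n + 2).toNat = n.toNat + 2 := by omega
      rw [h2]
      have h3 : n.toNat ^ 2 ≤ (n.toNat + 2) * (n.toNat + 2) := by nlinarith
      simp only [List.length_cons, List.length_nil]
      omega)
    (by omega)
  unfold bfsA bfsB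
  simp only [pyGetD_pair0, pyGetD_pair1]
  rw [show PySem.Set.ofList [((s0 : Int), s1)] = [(s0, s1)] from rfl]
  rw [show levelLoopB bd n removed (e0, e1) ((n * n).toNat + 2) [(s0, s1)] [(s0, s1)] 0
      = (match cellLoopB bd removed (e0, e1) 1 [(s0, s1)] [] [(s0, s1)] with
         | .inl a => a
         | .inr (nxt', vis') => levelLoopB bd n removed (e0, e1) ((n * n).toNat + 1) nxt' vis' 1)
    from by
      rw [show (n * n).toNat + 2 = ((n * n).toNat + 1) + 1 from rfl]
      simp only [levelLoopB, if_neg (List.cons_ne_nil (s0, s1) [])]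
      norm_num]
  rw [show ([[s0, s1]] : List (List Int)) = (([((s0 : Int), s1)] ++ []).map toL) by simp [toL]]
  exact hmain

-- ===== VERDICT (by name: the statement is the Claim_ definition above) =====
theorem solution_spec : Claim_equal_solution := by
  intro board n walls k start end_ hDom hPre
  unfold Spec_solution
  have hlenrange : (PySem.List.pyRange 0 (walls.length : Int) 1).length = walls.length := by
    rw [PySem.List.pyRange_zero_natCast]
    simp
  by_cases hse : start = end_
  · unfold solution solution_alt
    rw [if_pos hse, if_pos hse]
  · rcases hPre with h | hk | hk | hwf
    · exact absurd h hse
    · -- k < 0: no combination is generated, both sides answer -1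
      unfold solution solution_alt
      have hpick := pickA_eq (walls.length : Int) k (walls.length + 1) 0 [] []
        (by positivity) (by simp)
      simp only [List.length_nil, Nat.cast_zero, Int.sub_zero, List.nil_append] at hpick
      rw [if_neg hse, if_neg hse, hpick, combosB_empty _ _ (Or.inl hk)]
      simp
    · -- k > len(walls): no combination is generated, both sides answer -1
      unfold solution solution_alt
      have hpick := pickA_eq (walls.length : Int) k (walls.length + 1) 0 [] []
        (by positivity) (by simp)
      simp only [List.length_nil, Nat.cast_zero, Int.sub_zero, List.nil_append] at hpick
      rw [if_neg hse, if_neg hse, hpick, combosB_empty _ _ (by right; rw [hlenrange]; exact hk)]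
      simp
    · obtain ⟨hn, hblen, hrowlen, hrow0, hrowN, hcols, hwalls, hsl, hs0a, hs0b, hs1a, hs1b,
        hel, he0a, he0b, he1a, he1b⟩ := hwf
      obtain ⟨s0, s1, rfl⟩ := List.length_eq_two.mp hsl
      obtain ⟨e0, e1, rfl⟩ := List.length_eq_two.mp hel
      simp only [List.getD_cons_zero, List.getD_cons_succ] at hs0a hs0b hs1a hs1b he0a he0b he1a he1b
      have hshape : Shape n board := ⟨hblen, hrowlen⟩
      have hborder : ∀ r c : Int, 0 ≤ r → r ≤ n + 1 → 0 ≤ c → c ≤ n + 1 →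
          get2 board r c = 0 → interP n (r, c) := by
        intro r c h0 h1 h2 h3 hval
        by_contra hni
        have hcases : r = 0 ∨ r = n + 1 ∨ c = 0 ∨ c = n + 1 := by
          unfold interP at hni
          simp at hni
          omega
        rw [get2_nonneg _ _ _ h0 h2] at hval
        have hrlen : r.toNat < board.length := by omega
        have hrowm : board.getD r.toNat [] = board[r.toNat] := List.getD_eq_getElem _ _ hrlen
        have hrowmem : board[r.toNat] ∈ board := List.getElem_mem hrlen
        have hrl : (board[r.toNat]).length = (n + 2).toNat := hrowlen _ hrowmem
        have hclen : c.toNat < (board[r.toNat]).length := by omega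
        rcases hcases with h | h | h | h
        · rw [show r.toNat = 0 from by omega] at hval
          have h0len : 0 < board.length := by omega
          have hcl : c.toNat < (board.getD 0 []).length := by
            rw [List.getD_eq_getElem _ _ h0len, hrowlen _ (List.getElem_mem h0len)]; omega
          rw [List.getD_eq_getElem _ _ hcl] at hval
          exact hrow0 _ (List.getElem_mem hcl) hval
        · rw [show r.toNat = (n + 1).toNat from by omega] at hval
          have h0len : (n + 1).toNat < board.length := by omega
          have hcl : c.toNat < (board.getD (n + 1).toNat []).length := by
            rw [List.getD_eq_getElem _ _ h0len, hrowlen _ (List.getElem_mem h0len)]; omega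
          rw [List.getD_eq_getElem _ _ hcl] at hval
          exact hrowN _ (List.getElem_mem hcl) hval
        · rw [show c.toNat = 0 from by omega, hrowm] at hval
          exact (hcols _ hrowmem).1 hval
        · rw [show c.toNat = (n + 1).toNat from by omega, hrowm] at hval
          exact (hcols _ hrowmem).2 hval
      have hwallfact : ∀ i : Int, 0 ≤ i → i < (walls.length : Int) →
          1 ≤ wallR walls i ∧ wallR walls i ≤ n ∧ 1 ≤ wallC walls i ∧ wallC walls i ≤ n ∧
          get2 board (wallR walls i) (wallC walls i) = 1 := by
        intro i h0 h1
        have hi : i.toNat < walls.length := by omega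
        have hw : PySem.List.pyGetD walls i [] = walls[i.toNat] := by
          rw [PySem.List.pyGetD_of_nonneg _ _ h0, List.getD_eq_getElem _ _ hi]
        obtain ⟨hl2, ha, hb, hc, hd, hv⟩ := hwalls _ (List.getElem_mem hi)
        unfold wallR wallC
        rw [hw, PySem.List.pyGetD_of_nonneg _ _ (by norm_num),
          PySem.List.pyGetD_of_nonneg _ _ (by norm_num)]
        simp only [Int.toNat_zero, Int.toNat_one]
        refine ⟨ha, hb, hc, hd, ?_⟩
        rw [get2_nonneg _ _ _ (by omega) (by omega)]
        exact hv
      have hfold : ∀ cs : List (List Int),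
          (∀ c ∈ cs, ∀ i ∈ c, 0 ≤ i ∧ i < (walls.length : Int)) → ∀ acc : Int,
          cs.foldl (fun (st : List (List Int) × Int) c =>
            let bd := c.foldl (fun bd w => set2 bd (wallR walls w) (wallC walls w) 0) st.1
            let a := min st.2 (bfsA bd n [s0, s1] [e0, e1])
            let bd2 := c.foldl (fun bd w => set2 bd (wallR walls w) (wallC walls w) 1) bd
            (bd2, a)) (board, acc)
          = (board, cs.foldl (fun best idxs =>
              min best (bfsB board n
                (PySem.Set.ofList (idxs.map (fun i => (wallR walls i, wallC walls i))))
                [s0, s1] [e0, e1])) acc) := by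
        intro cs hcs
        induction cs with
        | nil => intro acc; rfl
        | cons c cs ih =>
          intro acc
          have hcv : ∀ i ∈ c, 0 ≤ i ∧ i < (walls.length : Int) := hcs c (by simp)
          have hvalid : ∀ i ∈ c, 0 ≤ wallR walls i ∧ wallR walls i < n + 2 ∧
              0 ≤ wallC walls i ∧ wallC walls i < n + 2 := by
            intro i hi
            obtain ⟨h0, h1⟩ := hcv i hi
            obtain ⟨a1, a2, a3, a4, a5⟩ := hwallfact i h0 h1
            exact ⟨by omega, by omega, by omega, by omega⟩
          have hmemwall : ∀ p ∈ removedCells walls c, get2 board p.1 p.2 = 1 := by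
            intro p hp
            obtain ⟨i, hi, rfl⟩ := List.mem_map.mp hp
            obtain ⟨h0, h1⟩ := hcv i hi
            exact (hwallfact i h0 h1).2.2.2.2
          set bd1 := c.foldl (fun bd w => set2 bd (wallR walls w) (wallC walls w) 0) board with hbd1
          have hbd1shape : Shape n bd1 := shape_foldl_set c 0 board hshape
          have hbd1get : ∀ r cc : Int, 0 ≤ r → 0 ≤ cc →
              get2 bd1 r cc = if (r, cc) ∈ removedCells walls c then 0 else get2 board r cc :=
            fun r cc hr hc => get2_foldl_set c 0 board hshape hvalid r cc hr hc
          -- the restore loop puts the original board back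
          have hrest : c.foldl (fun bd w => set2 bd (wallR walls w) (wallC walls w) 1) bd1
              = board := by
            apply board_ext (shape_foldl_set c 1 bd1 hbd1shape) hshape
            intro r cc hr0 hr1 hc0 hc1
            rw [get2_foldl_set c 1 bd1 hbd1shape hvalid r cc hr0 hc0, hbd1get r cc hr0 hc0]
            by_cases hmem : (r, cc) ∈ removedCells walls c
            · rw [if_pos hmem]
              exact (hmemwall _ hmem).symm
            · rw [if_neg hmem, if_neg hmem]
          -- per-combination BFS agreement
          have hbfs : bfsA bd1 n [s0, s1] [e0, e1]
              = bfsB board n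
                  (PySem.Set.ofList (c.map (fun i => (wallR walls i, wallC walls i))))
                  [s0, s1] [e0, e1] := by
            apply bfs_eq hn
            · intro r cc hr0 hr1 hc0 hc1
              rw [hbd1get r cc hr0 hc0]
              rw [PySem.Set.mem_ofList]
              by_cases hmem : (r, cc) ∈ removedCells walls c
              · simp only [if_pos hmem]
                constructor
                · intro _; exact Or.inr hmem
                · intro _; trivial
              · simp only [if_neg hmem]
                constructor
                · intro h; left; exact h
                · rintro (h | h)
                  · exact h
                  · exact absurd h hmem
            · intro r cc hr0 hr1 hc0 hc1 hv
              rw [hbd1get r cc hr0 hc0] at hv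
              by_cases hmem : (r, cc) ∈ removedCells walls c
              · obtain ⟨i, hi, hieq⟩ := List.mem_map.mp hmem
                obtain ⟨h0, h1⟩ := hcv i hi
                obtain ⟨a1, a2, a3, a4, a5⟩ := hwallfact i h0 h1
                have : r = wallR walls i ∧ cc = wallC walls i := by
                  rw [Prod.mk.injEq] at hieq
                  exact ⟨hieq.1.symm, hieq.2.symm⟩
                exact ⟨by omega, by omega, by omega, by omega⟩
              · rw [if_neg hmem] at hv
                exact hborder r cc hr0 hr1 hc0 hc1 hv
            · exact ⟨hs0a, hs0b, hs1a, hs1b⟩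
          simp only [List.foldl_cons]
          rw [← hbd1, hrest, hbfs]
          exact ih (fun c' hc' => hcs c' (by simp [hc'])) _
      -- assemble
      unfold solution solution_alt
      rw [if_neg hse, if_neg hse]
      have hpick := pickA_eq (walls.length : Int) k (walls.length + 1) 0 [] []
        (by positivity) (by simp)
      simp only [List.length_nil, Nat.cast_zero, Int.sub_zero, List.nil_append] at hpick
      rw [hpick]
      simp only [List.map_id']
      have hcombo : ∀ c ∈ combosB (PySem.List.pyRange 0 (walls.length : Int) 1) k,
          ∀ i ∈ c, 0 ≤ i ∧ i < (walls.length : Int) := by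
        intro c hc i hi
        have := mem_combosB hc i hi
        rw [PySem.List.mem_pyRange_one] at this
        exact this
      rw [hfold _ hcombo (n * n)]
      set best := (combosB (PySem.List.pyRange 0 (walls.length : Int) 1) k).foldl
        (fun best idxs =>
          min best (bfsB board n
            (PySem.Set.ofList (idxs.map (fun i => (wallR walls i, wallC walls i))))
            [s0, s1] [e0, e1])) (n * n) with hbest
      by_cases hb : best = n * n
      · rw [if_neg (by simp [hb]), if_pos hb]
      · rw [if_pos hb, if_neg hb]
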